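-- pv_equiv track=rewrite | github.com/sweettypdevassy/defect-monitor-server | src/tag_suggester.py | _determine_primary_tag
-- ===== SOURCE A (Python) =====
-- from typing import Dict, List, Optional, Tuple
--
-- def _determine_primary_tag(tags_lower: List[str]) -> Optional[str]:
--     """Determine the primary triage tag from a list of tags"""
--     # Priority order: infrastructure > test > product
--     if any('infra' in tag or 'infrastructure' in tag for tag in tags_lower):
--         return 'infrastructure_bug'
--     elif any('test' in tag for tag in tags_lower):
--         return 'test_bug'
--     elif any('product' in tag for tag in tags_lower):
--         return 'product_bug'
--     return None
-- ===== SOURCE B (Python) =====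
-- from typing import List, Optional
--
-- _PRIORITY = (('infra', 'infrastructure_bug'), ('test', 'test_bug'), ('product', 'product_bug'))
--
-- def _rank(tag: str) -> int:
--     """Index of the highest-priority pattern contained in tag, or len(_PRIORITY) if none."""
--     for i, (pattern, _) in enumerate(_PRIORITY):
--         if pattern in tag:
--             return i
--     return len(_PRIORITY)
--
-- def _determine_primary_tag(tags_lower: List[str]) -> Optional[str]:
--     """Map every tag to a numeric priority rank and take the minimum; the table row
--     at that rank gives the result.  ('infrastructure' in tag implies 'infra' in tag,
--     so one pattern per category suffices.)"""
--     best = min(map(_rank, tags_lower), default=len(_PRIORITY))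
--     return _PRIORITY[best][1] if best < len(_PRIORITY) else None
-- ===== Notes on version B (the rewrite author's own statement) =====
-- stated objective: alternative
-- what changed: Replaces A's three separate short-circuiting any() substring scans with a data-driven priority table: each tag is mapped to a numeric rank (index of the first matching pattern), the minimum rank over the list is taken, and the answer is read off the table; the redundant 'infrastructure' pattern is dropped since it implies 'infra'.
import Mathlib
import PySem

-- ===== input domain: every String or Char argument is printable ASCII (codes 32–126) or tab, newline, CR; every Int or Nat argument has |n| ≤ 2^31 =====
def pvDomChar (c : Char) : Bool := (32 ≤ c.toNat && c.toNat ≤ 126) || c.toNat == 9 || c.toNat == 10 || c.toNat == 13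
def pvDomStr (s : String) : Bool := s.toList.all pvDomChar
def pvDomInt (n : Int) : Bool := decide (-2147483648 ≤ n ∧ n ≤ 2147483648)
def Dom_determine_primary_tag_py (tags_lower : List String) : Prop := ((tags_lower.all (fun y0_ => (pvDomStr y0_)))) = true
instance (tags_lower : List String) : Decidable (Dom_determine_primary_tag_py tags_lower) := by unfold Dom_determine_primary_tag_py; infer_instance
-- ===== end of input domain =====

-- B replaces A's three short-circuiting any() scans with a data-driven priority table:
-- each tag is mapped to a numeric rank, the minimum rank is taken, and the answer is
-- read off the table (objective: alternative).

-- ===== PORT A =====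
-- Port of A: three short-circuiting any-scans in priority order.
def determine_primary_tag_py (tags_lower : List String) : Option String :=
  if tags_lower.any (fun tag => PySem.Str.isIn "infra" tag || PySem.Str.isIn "infrastructure" tag) then
    some "infrastructure_bug"
  else if tags_lower.any (fun tag => PySem.Str.isIn "test" tag) then
    some "test_bug"
  else if tags_lower.any (fun tag => PySem.Str.isIn "product" tag) then
    some "product_bug"
  else
    none

-- ===== PORT B =====
-- The priority table _PRIORITY of Source B.
def pvPriority : List (String × String) :=
  [("infra", "infrastructure_bug"), ("test", "test_bug"), ("product", "product_bug")]

-- _rank's loop over the table with an index, ported by hand step for step (exact: early return at the first match).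
def pvRankLoop (tag : String) (i : Nat) : List (String × String) → Nat
  | [] => pvPriority.length
  | (pattern, _) :: rest =>
      if PySem.Str.isIn pattern tag then i else pvRankLoop tag (i + 1) rest

def pvRank (tag : String) : Nat := pvRankLoop tag 0 pvPriority

-- Source B's final line: read the table row at the best rank, if any.
def pvFinish (best : Nat) : Option String :=
  if best < pvPriority.length then some ((pvPriority.getD best ("", "")).2) else none

-- Port of B: min over the ranks, then read the table row.
def determine_primary_tag_py_alt (tags_lower : List String) : Option String :=
  pvFinish ((PySem.List.min? (tags_lower.map pvRank) (fun x => x)).getD pvPriority.length)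

-- ===== PRECONDITION & SPEC =====
def Spec_determine_primary_tag_py (tags_lower : List String) (out : Option String) : Prop := out = determine_primary_tag_py_alt tags_lower
instance (tags_lower : List String) (out : Option String) : Decidable (Spec_determine_primary_tag_py tags_lower out) := by unfold Spec_determine_primary_tag_py; infer_instance

-- ===== CLAIM =====
def Claim_equal_determine_primary_tag_py : Prop := ∀ (tags_lower : List String), Dom_determine_primary_tag_py tags_lower → Spec_determine_primary_tag_py tags_lower (determine_primary_tag_py tags_lower)

-- ===== LEMMAS AND PROOFS =====

-- pvRank as a nested-if over the three patterns.
theorem pvRank_eq (tag : String) :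
    pvRank tag =
      if PySem.Str.isIn "infra" tag then 0
      else if PySem.Str.isIn "test" tag then 1
      else if PySem.Str.isIn "product" tag then 2 else 3 := by
  simp only [pvRank, pvRankLoop, pvPriority]
  rfl

-- the minimum rank over a list of tags, in closed form
def pvR (tags : List String) : Nat :=
  if tags.any (fun t => PySem.Str.isIn "infra" t) then 0
  else if tags.any (fun t => PySem.Str.isIn "test" t) then 1
  else if tags.any (fun t => PySem.Str.isIn "product" t) then 2 else 3

theorem pvRank_min_pvR (t : String) (ts : List String) :
    min (pvRank t) (pvR ts) = pvR (t :: ts) := by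
  simp only [pvR, pvRank_eq, List.any_cons]
  rcases Bool.eq_false_or_eq_true (PySem.Str.isIn "infra" t) with h1 | h1 <;>
    rcases Bool.eq_false_or_eq_true (PySem.Str.isIn "test" t) with h2 | h2 <;>
      rcases Bool.eq_false_or_eq_true (PySem.Str.isIn "product" t) with h3 | h3 <;>
        simp only [h1, h2, h3, Bool.true_or, Bool.false_or, Bool.false_eq_true, if_true, if_false] <;> split_ifs <;> omega

theorem foldl_min_rank (tags : List String) (a : Nat) (ha : a ≤ 3) :
    (tags.map pvRank).foldl min a = min a (pvR tags) := by
  induction tags generalizing a with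
  | nil => simp [pvR]; omega
  | cons t ts ih =>
    have hr : pvRank t ≤ 3 := by rw [pvRank_eq]; split_ifs <;> omega
    rw [List.map_cons, List.foldl_cons, ih (min a (pvRank t)) (by omega),
      min_assoc, pvRank_min_pvR]

theorem best_eq (tags : List String) :
    (PySem.List.min? (tags.map pvRank) (fun x => x)).getD pvPriority.length = pvR tags := by
  cases tags with
  | nil => simp [PySem.List.min?, pvR, pvPriority]
  | cons t ts =>
    rw [List.map_cons, PySem.List.min?_id_cons, Option.getD_some,
      foldl_min_rank ts (pvRank t) (by rw [pvRank_eq]; split_ifs <;> omega),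
      pvRank_min_pvR]

-- 'infrastructure' in tag implies 'infra' in tag, so A's first disjunct absorbs the second.
theorem infra_absorb (tag : String) :
    (PySem.Str.isIn "infra" tag || PySem.Str.isIn "infrastructure" tag) = PySem.Str.isIn "infra" tag := by
  cases h : PySem.Str.isIn "infrastructure" tag with
  | false => simp
  | true =>
    have h2 : PySem.Str.isIn "infra" tag = true := by
      rw [PySem.Str.isIn_iff_infix] at h ⊢
      exact List.IsInfix.trans (by decide : "infra".toList <:+: "infrastructure".toList) h
    rw [h2]
    simp

-- ===== VERDICT =====
theorem determine_primary_tag_py_spec : Claim_equal_determine_primary_tag_py := by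
  intro tags _
  unfold Spec_determine_primary_tag_py determine_primary_tag_py determine_primary_tag_py_alt
  rw [best_eq]
  simp only [infra_absorb]
  unfold pvR
  split_ifs <;> simp [pvFinish, pvPriority]
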